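-- pv_equiv track=rewrite | github.com/twledo/python | descriptador.py | descriptador
-- ===== SOURCE A (Python) =====
-- def descriptador(senha, cont):
--     senha_nova = ''
--     for i in senha:
--         numeros_letras = ord(i) + cont
--         # Se o valor estiver abaixo de 33, adicionamos 93 para envolvê-lo de volta dentro do intervalo 33-126
--         # Se estiver acima de 126, subtraímos 93 para trazê-lo de volta para dentro do intervalo
--         while numeros_letras < 33:
--             numeros_letras += 93
--         while numeros_letras > 126:
--             numeros_letras -= 93
--         senha_nova += chr(numeros_letras)
--     return senha_nova
-- ===== SOURCE B (Python) =====
-- def descriptador(senha, cont):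
--     def wrap(x):
--         if x < 33:
--             return 33 + (x - 33) % 93
--         if x > 126:
--             return 34 + (x - 34) % 93
--         return x
--     return ''.join(chr(wrap(ord(c) + cont)) for c in senha)
-- ===== Notes on version B (the rewrite author's own statement) =====
-- stated objective: faster
-- what changed: Replaced the per-character while-loops (O(|cont|/93) iterations each) with a closed-form modular-arithmetic wrap into [33,126], and built the result with a join over a generator instead of repeated string concatenation.
import Mathlib
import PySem

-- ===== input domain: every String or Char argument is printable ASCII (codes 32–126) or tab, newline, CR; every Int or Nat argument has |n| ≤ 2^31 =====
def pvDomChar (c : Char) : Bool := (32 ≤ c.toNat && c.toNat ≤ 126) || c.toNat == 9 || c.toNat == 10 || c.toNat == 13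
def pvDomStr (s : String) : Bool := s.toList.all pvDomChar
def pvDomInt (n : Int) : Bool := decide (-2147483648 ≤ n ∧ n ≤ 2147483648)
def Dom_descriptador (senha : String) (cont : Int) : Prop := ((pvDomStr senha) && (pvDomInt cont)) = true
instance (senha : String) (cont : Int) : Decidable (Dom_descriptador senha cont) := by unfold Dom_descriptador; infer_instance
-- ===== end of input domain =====

-- B replaces A's per-character wrap-around while-loops by closed-form modular arithmetic (faster in a timing run; asymptotic in |cont|).


-- ===== PORT A =====
-- 'while numeros_letras < 33: numeros_letras += 93'
def pvWhileUp (x : Int) : Int :=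
  if x < 33 then pvWhileUp (x + 93) else x
termination_by (33 - x).toNat
decreasing_by omega

-- 'while numeros_letras > 126: numeros_letras -= 93'
def pvWhileDown (x : Int) : Int :=
  if 126 < x then pvWhileDown (x - 93) else x
termination_by (x - 126).toNat
decreasing_by omega

-- chr(n): after both while-loops the value is in [33,126], where Char.ofNat n.toNat is exactly chr(n)
def descriptador (senha : String) (cont : Int) : String :=
  senha.toList.foldl
    (fun senha_nova i =>
      senha_nova ++ String.ofList [Char.ofNat (pvWhileDown (pvWhileUp ((i.toNat : Int) + cont))).toNat])
    ""

-- ===== PORT B =====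
-- closed-form wrap of x into [33,126] (Python '%' = PySem.Int.mod)
def pvWrap (x : Int) : Int :=
  if x < 33 then 33 + PySem.Int.mod (x - 33) 93
  else if x > 126 then 34 + PySem.Int.mod (x - 34) 93
  else x

def descriptador_alt (senha : String) (cont : Int) : String :=
  String.ofList (senha.toList.map (fun c => Char.ofNat (pvWrap ((c.toNat : Int) + cont)).toNat))

-- ===== PRECONDITION & SPEC =====
def Spec_descriptador (senha : String) (cont : Int) (out : String) : Prop := out = descriptador_alt senha cont
instance (senha : String) (cont : Int) (out : String) : Decidable (Spec_descriptador senha cont out) := by unfold Spec_descriptador; infer_instance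

-- ===== CLAIM (what is proved, stated in full; the proofs are below) =====
def Claim_equal_descriptador : Prop := ∀ (senha : String) (cont : Int), Dom_descriptador senha cont → Spec_descriptador senha cont (descriptador senha cont)

-- ===== LEMMAS AND PROOFS =====

theorem pvWhileUp_char (x : Int) : pvWhileUp x = if x < 33 then 33 + (x - 33) % 93 else x := by
  induction x using pvWhileUp.induct with
  | _ x ih =>
    rw [pvWhileUp]
    split_ifs at ih ⊢ <;> omega

theorem pvWhileDown_char (x : Int) : pvWhileDown x = if 126 < x then 34 + (x - 34) % 93 else x := by
  induction x using pvWhileDown.induct with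
  | _ x ih =>
    rw [pvWhileDown]
    split_ifs at ih ⊢ <;> omega

theorem pvWrap_eq (x : Int) : pvWhileDown (pvWhileUp x) = pvWrap x := by
  simp only [pvWrap, PySem.Int.mod_eq_emod_of_pos (show (0:Int) < 93 by omega)]
  rw [pvWhileUp_char, pvWhileDown_char]
  split_ifs <;> omega

theorem foldl_acc (l : List Char) (f : Char → Char) (s : String) :
    l.foldl (fun acc c => acc ++ String.ofList [f c]) s = s ++ String.ofList (l.map f) := by
  induction l generalizing s with
  | nil => simp
  | cons c t ih =>
    simp only [List.foldl, List.map, ih]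
    apply String.ext
    simp [String.toList_append]

-- ===== VERDICT (by name: the statement is the Claim_ definition above) =====
theorem descriptador_spec : Claim_equal_descriptador := by
  intro senha cont _
  unfold Spec_descriptador descriptador descriptador_alt
  rw [show (fun (senha_nova : String) (i : Char) =>
        senha_nova ++ String.ofList [Char.ofNat (pvWhileDown (pvWhileUp ((i.toNat : Int) + cont))).toNat])
      = fun senha_nova i =>
        senha_nova ++ String.ofList [Char.ofNat (pvWrap ((i.toNat : Int) + cont)).toNat]
    from by funext a c; rw [pvWrap_eq]]
  rw [foldl_acc]
  apply String.ext
  simp
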